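-- pv_equiv track=rewrite | github.com/vitalfadeev/AI | machine/analyzer/DataPreAnalyser.py | CountGroupDictValues
-- ===== SOURCE A (Python) =====
-- def CountGroupDictValues(DictToGroupCount, ListOfGroups):
--     """
--     :param DictToGroupCount: dict with columns and their types. Like {column_name: column_type}.
--     :return: dict with column type and number of columns with this type.
--     """
--     """
--     Function count types of columns. Save to dictionary.
--     """
--     from collections import defaultdict
--
--     DictGroupedCounted = []
--
--     # Create dict with all possible types as keys and 0 as default value
--     dict_with_counted_types = defaultdict.fromkeys(ListOfGroups, 0)
--
--     # Count types in dict
--     for value in DictToGroupCount.values():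
--         if value in ListOfGroups:
--             dict_with_counted_types[value] += 1
--
--     DictGroupedCounted.append(dict(dict_with_counted_types))
--     return DictGroupedCounted
-- ===== SOURCE B (Python) =====
-- def CountGroupDictValues(DictToGroupCount, ListOfGroups):
--     def counts(vals):
--         if len(vals) <= 1:
--             if vals and vals[0] in ListOfGroups:
--                 return {vals[0]: 1}
--             return {}
--         mid = len(vals) // 2
--         left = counts(vals[:mid])
--         for k, v in counts(vals[mid:]).items():
--             left[k] = left.get(k, 0) + v
--         return left
--     c = counts(list(DictToGroupCount.values()))
--     return [{g: c.get(g, 0) for g in ListOfGroups}]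
-- ===== Notes on version B (the rewrite author's own statement) =====
-- stated objective: alternative
-- what changed: A makes one linear filtered counting pass over the dict values into a zero-initialized group dict; B counts by divide and conquer - it recursively splits the value list in halves, counts each half into a partial dict, merges the partial dicts by adding counts, and only at the end reads each group's count off the merged dict.
import Mathlib
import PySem

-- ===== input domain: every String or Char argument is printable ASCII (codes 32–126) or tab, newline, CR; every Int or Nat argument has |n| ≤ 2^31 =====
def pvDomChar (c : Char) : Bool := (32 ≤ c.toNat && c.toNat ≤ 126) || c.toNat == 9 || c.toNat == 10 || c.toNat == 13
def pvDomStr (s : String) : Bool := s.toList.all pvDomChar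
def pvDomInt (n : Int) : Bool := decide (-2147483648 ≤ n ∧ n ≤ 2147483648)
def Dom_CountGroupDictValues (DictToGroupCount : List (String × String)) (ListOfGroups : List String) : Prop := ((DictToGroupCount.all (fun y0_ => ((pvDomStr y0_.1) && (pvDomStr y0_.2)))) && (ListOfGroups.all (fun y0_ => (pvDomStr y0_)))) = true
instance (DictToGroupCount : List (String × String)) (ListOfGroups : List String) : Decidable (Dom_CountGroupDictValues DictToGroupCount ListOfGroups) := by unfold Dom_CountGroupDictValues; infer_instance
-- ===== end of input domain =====

-- B replaces A's single filtered counting pass over the dict values by a divide-and-conquer count: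
-- split the value list in halves, count each half recursively, merge the partial count dicts by
-- addition, and read each group's count off the merged dict (objective: alternative algorithm).

-- ===== PORT A =====
def CountGroupDictValues (DictToGroupCount : List (String × String)) (ListOfGroups : List String) : List (List (String × Int)) :=
  -- dict_with_counted_types = defaultdict.fromkeys(ListOfGroups, 0)
  let dict_with_counted_types : PySem.Dict String Int :=
    ListOfGroups.foldl (fun d g => d.insert g (0 : Int)) PySem.Dict.empty
  -- for value in DictToGroupCount.values(): if value in ListOfGroups: dict_with_counted_types[value] += 1
  -- (the key is always present — it came from ListOfGroups — so 'd[value] += 1' is modify; the default 0 is never read)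
  let counted :=
    (PySem.Dict.mk DictToGroupCount).values.foldl
      (fun d v => if v ∈ ListOfGroups then d.modify v 0 (· + 1) else d) dict_with_counted_types
  -- DictGroupedCounted.append(dict(...)); return DictGroupedCounted
  [counted.items]

-- ===== PORT B =====
-- the inner recursive helper 'counts' of Source B; vals[:mid] / vals[mid:] are List.take / List.drop
-- (exact for 0 ≤ mid ≤ len, cf. PySem.List.slice_to / slice_from)
def pvCountsB (G : List String) (fuel : Nat) (vals : List String) : PySem.Dict String Int :=
    if vals.length ≤ 1 then
      -- if vals and vals[0] in ListOfGroups: return {vals[0]: 1}; return {}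
      match vals with
      | [] => PySem.Dict.empty
      | v :: _ => if v ∈ G then PySem.Dict.empty.insert v 1 else PySem.Dict.empty
    else
      -- fuel only bounds the recursion depth for Lean's termination checker; the initial
      -- fuel (the list length) is never exhausted, so the 0 arm is unreachable
      match fuel with
      | 0 => PySem.Dict.empty
      | f + 1 =>
        let mid := vals.length / 2
        let left := pvCountsB G f (vals.take mid)
        -- for k, v in counts(vals[mid:]).items(): left[k] = left.get(k, 0) + v
        (pvCountsB G f (vals.drop mid)).items.foldl
          (fun l p => l.insert p.1 (l.getD p.1 0 + p.2)) left

def CountGroupDictValues_alt (DictToGroupCount : List (String × String)) (ListOfGroups : List String) : List (List (String × Int)) :=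
  -- c = counts(list(DictToGroupCount.values()))
  let vs := (PySem.Dict.mk DictToGroupCount).values
  let c := pvCountsB ListOfGroups vs.length vs
  -- return [{g: c.get(g, 0) for g in ListOfGroups}]
  [(ListOfGroups.foldl (fun d g => d.insert g (c.getD g 0)) PySem.Dict.empty).items]

-- ===== PRECONDITION & SPEC =====
def Spec_CountGroupDictValues (DictToGroupCount : List (String × String)) (ListOfGroups : List String) (out : List (List (String × Int))) : Prop := out = CountGroupDictValues_alt DictToGroupCount ListOfGroups
instance (DictToGroupCount : List (String × String)) (ListOfGroups : List String) (out : List (List (String × Int))) : Decidable (Spec_CountGroupDictValues DictToGroupCount ListOfGroups out) := by unfold Spec_CountGroupDictValues; infer_instance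

-- ===== CLAIM (what is proved, stated in full; the proofs are below) =====
def Claim_equal_CountGroupDictValues : Prop := ∀ (DictToGroupCount : List (String × String)) (ListOfGroups : List String), Dom_CountGroupDictValues DictToGroupCount ListOfGroups → Spec_CountGroupDictValues DictToGroupCount ListOfGroups (CountGroupDictValues DictToGroupCount ListOfGroups)

-- ===== LEMMAS AND PROOFS =====

-- getD after a fold that inserts a value depending only on the key
theorem getD_foldl_insert_fn (G : List String) (c : String → Int) (d : PySem.Dict String Int) (k : String) :
    (G.foldl (fun d g => d.insert g (c g)) d).getD k 0 = if k ∈ G then c k else d.getD k 0 := by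
  induction G generalizing d with
  | nil => simp
  | cons g rest ih =>
      simp only [List.foldl_cons, ih, PySem.Dict.getD_insert, List.mem_cons]
      by_cases hr : k ∈ rest
      · simp [hr]
      · by_cases hg : k = g <;> simp [hr, hg]

-- a Set.update with only already-present elements is a no-op
theorem set_update_of_subset (s : PySem.Set String) (xs : List String) (h : ∀ x ∈ xs, x ∈ s) :
    PySem.Set.update s xs = s := by
  rw [PySem.Set.update_eq_append_filter]
  have hnil : (PySem.Set.ofList xs).filter (fun y => !s.contains y) = [] := by
    apply List.filter_eq_nil_iff.mpr
    intro y hy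
    simpa using h y ((PySem.Set.mem_ofList xs y).mp hy)
  rw [hnil, List.append_nil]

-- A's counted dict: value at a key k ∈ ListOfGroups is the count of k among the dict values
theorem A_getD (vals G : List String) (k : String) (hk : k ∈ G) :
    ((vals.foldl (fun d v => if v ∈ G then d.modify v 0 (· + 1) else d)
        (G.foldl (fun d g => d.insert g (0 : Int)) PySem.Dict.empty)).getD k 0)
      = (vals.count k : Int) := by
  have hfold :
      (vals.foldl (fun d v => if v ∈ G then d.modify v 0 (· + 1) else d)
        (G.foldl (fun d g => d.insert g (0 : Int)) PySem.Dict.empty))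
      = ((vals.filter (fun v => decide (v ∈ G))).foldl (fun d v => d.modify v 0 (· + 1))
        (G.foldl (fun d g => d.insert g (0 : Int)) PySem.Dict.empty)) := by
    rw [List.foldl_filter]
    simp
  rw [hfold, PySem.Dict.getD_foldl_modify_add_one,
      getD_foldl_insert_fn G (fun _ => (0 : Int)), if_pos hk,
      List.count_filter (by simpa using hk)]
  simp

-- A's counted dict has exactly the deduplicated groups as keys
theorem A_keys (vals G : List String) :
    ((vals.foldl (fun d v => if v ∈ G then d.modify v 0 (· + 1) else d)
        (G.foldl (fun d g => d.insert g (0 : Int)) PySem.Dict.empty)).keys)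
      = PySem.Set.ofList G := by
  have hfold :
      (vals.foldl (fun d v => if v ∈ G then d.modify v 0 (· + 1) else d)
        (G.foldl (fun d g => d.insert g (0 : Int)) PySem.Dict.empty))
      = ((vals.filter (fun v => decide (v ∈ G))).foldl (fun d v => d.modify v 0 (· + 1))
        (G.foldl (fun d g => d.insert g (0 : Int)) PySem.Dict.empty)) := by
    rw [List.foldl_filter]; simp
  rw [hfold]
  rw [PySem.Dict.keys_foldl_modify _ 0 (fun _ _ => (· + 1)),
      PySem.Dict.keys_foldl_insert _ (fun _ g => (0 : Int))]
  rw [PySem.Dict.keys_empty, PySem.Set.update_nil_left]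
  apply set_update_of_subset
  intro x hx
  have := List.of_mem_filter hx
  exact (PySem.Set.mem_ofList G x).mpr (by simpa using this)

-- B's final dict keys
theorem B_keys (c : String → Int) (G : List String) :
    ((G.foldl (fun d g => d.insert g (c g)) PySem.Dict.empty).keys) = PySem.Set.ofList G := by
  rw [PySem.Dict.keys_foldl_insert _ (fun _ g => c g), PySem.Dict.keys_empty,
      PySem.Set.update_nil_left]

-- B's merge loop: getD of the fold is the start value plus the sum of the matching entries
theorem merge_getD (ps : List (String × Int)) (l : PySem.Dict String Int) (k : String) :
    ((ps.foldl (fun l p => l.insert p.1 (l.getD p.1 0 + p.2)) l).getD k 0)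
      = l.getD k 0 + ((ps.filter (fun p => decide (p.1 = k))).map Prod.snd).sum := by
  induction ps generalizing l with
  | nil => simp
  | cons p rest ih =>
      simp only [List.foldl_cons, ih, PySem.Dict.getD_insert]
      by_cases hp : p.1 = k
      · simp [hp]; ring
      · simp [hp, Ne.symm hp]

-- a nodup list filtered at one element
theorem filter_eq_of_nodup (l : List String) (hl : l.Nodup) (k : String) :
    l.filter (fun x => decide (x = k)) = if k ∈ l then [k] else [] := by
  induction l with
  | nil => simp
  | cons x rest ih =>
      have hx : x ∉ rest := (List.nodup_cons.mp hl).1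
      have ih' := ih (List.nodup_cons.mp hl).2
      by_cases hxk : x = k
      · subst hxk
        simp [ih', hx]
      · simp [hxk, ih', Ne.symm hxk]

-- the sum of matching item entries of a nodup-keyed dict is its getD
theorem sum_filter_items (d : PySem.Dict String Int) (h : d.keys.Nodup) (k : String) :
    (((d.items.filter (fun p => decide (p.1 = k))).map Prod.snd).sum) = d.getD k 0 := by
  rw [PySem.Dict.items_eq_map_keys d h 0, List.filter_map, List.map_map]
  have hf : ((fun p : String × Int => decide (p.1 = k)) ∘ fun k' => (k', d.getD k' 0))
      = fun x => decide (x = k) := by funext x; rfl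
  rw [hf, filter_eq_of_nodup d.keys h k]
  by_cases hm : k ∈ d.keys
  · simp [hm]
  · have : d.contains k = false := by
      rw [PySem.Dict.contains_eq_decide_mem_keys]; simpa using hm
    simp [hm, PySem.Dict.getD_of_not_contains d 0 this]

-- pvCountsB produces a dict with nodup keys
theorem countsB_nodup (G : List String) : ∀ (fuel : Nat) (vals : List String),
    (pvCountsB G fuel vals).keys.Nodup := by
  intro fuel
  induction fuel with
  | zero =>
      intro vals
      rw [pvCountsB.eq_def]
      by_cases h1 : vals.length ≤ 1
      · rw [if_pos h1]
        match vals with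
        | [] => exact PySem.Dict.nodup_keys_empty
        | v :: _ =>
            by_cases hvG : v ∈ G
            · simp only [if_pos hvG]
              exact PySem.Dict.nodup_keys_insert _ v 1 PySem.Dict.nodup_keys_empty
            · simp only [if_neg hvG]; exact PySem.Dict.nodup_keys_empty
      · rw [if_neg h1]; exact PySem.Dict.nodup_keys_empty
  | succ m ih =>
      intro vals
      rw [pvCountsB.eq_def]
      by_cases h1 : vals.length ≤ 1
      · rw [if_pos h1]
        match vals with
        | [] => exact PySem.Dict.nodup_keys_empty
        | v :: _ =>
            by_cases hvG : v ∈ G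
            · simp only [if_pos hvG]
              exact PySem.Dict.nodup_keys_insert _ v 1 PySem.Dict.nodup_keys_empty
            · simp only [if_neg hvG]; exact PySem.Dict.nodup_keys_empty
      · rw [if_neg h1]
        exact PySem.Dict.nodup_keys_foldl_insert_key _ Prod.fst _ _ (ih _)

-- the value of pvCountsB at any key: the count of that key among the values if it is a group, else 0
theorem countsB_getD (G : List String) (k : String) : ∀ (fuel : Nat) (vals : List String),
    vals.length ≤ fuel + 1 →
    (pvCountsB G fuel vals).getD k 0 = if k ∈ G then (vals.count k : Int) else 0 := by
  intro fuel
  induction fuel with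
  | zero =>
      intro vals hv
      rw [pvCountsB.eq_def, if_pos hv]
      match vals, hv with
      | [], _ => simp
      | [v], _ =>
          by_cases hvG : v ∈ G
          · simp only [if_pos hvG, PySem.Dict.getD_insert, PySem.Dict.getD_empty]
            by_cases hkv : k = v
            · subst hkv; simp [hvG]
            · simp [hkv, Ne.symm hkv]
          · simp only [if_neg hvG, PySem.Dict.getD_empty]
            by_cases hkG : k ∈ G
            · have hkv : v ≠ k := fun h => hvG (h ▸ hkG)
              simp [hkG, hkv]
            · simp [hkG]
  | succ m ih =>
      intro vals hv
      rw [pvCountsB.eq_def]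
      by_cases h1 : vals.length ≤ 1
      · rw [if_pos h1]
        match vals, h1 with
        | [], _ => simp
        | [v], _ =>
            by_cases hvG : v ∈ G
            · simp only [if_pos hvG, PySem.Dict.getD_insert, PySem.Dict.getD_empty]
              by_cases hkv : k = v
              · subst hkv; simp [hvG]
              · simp [hkv, Ne.symm hkv]
            · simp only [if_neg hvG, PySem.Dict.getD_empty]
              by_cases hkG : k ∈ G
              · have hkv : v ≠ k := fun h => hvG (h ▸ hkG)
                simp [hkG, hkv]
              · simp [hkG]
      · rw [if_neg h1]
        have h2 : 2 ≤ vals.length := by omega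
        have hlm : (vals.take (vals.length / 2)).length ≤ m + 1 := by
          simp only [List.length_take]; omega
        have hrm : (vals.drop (vals.length / 2)).length ≤ m + 1 := by
          simp only [List.length_drop]; omega
        rw [merge_getD, sum_filter_items _ (countsB_nodup G _ _) k,
            ih _ hlm, ih _ hrm]
        have hcnt : vals.count k
            = (vals.take (vals.length / 2)).count k + (vals.drop (vals.length / 2)).count k := by
          conv_lhs => rw [← List.take_append_drop (vals.length / 2) vals]
          rw [List.count_append]
        by_cases hkG : k ∈ G
        · simp only [if_pos hkG, hcnt]; push_cast; ring
        · simp [hkG]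

-- ===== VERDICT (by name: the statement is the Claim_ definition above) =====
theorem CountGroupDictValues_spec : Claim_equal_CountGroupDictValues := by
  intro D G _
  unfold Spec_CountGroupDictValues CountGroupDictValues CountGroupDictValues_alt
  simp only
  congr 1
  set vals := (PySem.Dict.mk D).values with hv
  set c : String → Int := fun g => (pvCountsB G vals.length vals).getD g 0 with hc
  have hA := A_keys vals G
  have hB := B_keys c G
  rw [PySem.Dict.items_eq_map_keys _ (by rw [hA]; exact PySem.Set.nodup_ofList G) 0,
      PySem.Dict.items_eq_map_keys _ (by rw [hB]; exact PySem.Set.nodup_ofList G) 0,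
      hA, hB]
  apply List.map_congr_left
  intro k hk
  have hkG : k ∈ G := (PySem.Set.mem_ofList G k).mp hk
  rw [A_getD vals G k hkG, getD_foldl_insert_fn G c, if_pos hkG, hc]
  simp only
  rw [countsB_getD G k vals.length vals (by omega), if_pos hkG]
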